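-- pv_equiv track=rewrite | github.com/gabfl/vault | src/modules/autocomplete.py | find_breaking_strings
-- ===== SOURCE A (Python) =====
-- def find_breaking_strings(string):
--     """ Find last breaking string in a string """
--
--     breaking_strings = [' ', '@', '?', '#', '$', '%', '&', '*']
--     result = 0
--     for breaking_string in breaking_strings:
--         rf = string.rfind(breaking_string)
--         if rf > result:
--             result = rf
--
--     return result
-- ===== SOURCE B (Python) =====
-- def find_breaking_strings(string):
--     """ Find last breaking string in a string """
--
--     breaking = {' ', '@', '?', '#', '$', '%', '&', '*'}
--     for i in range(len(string) - 1, -1, -1):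
--         if string[i] in breaking:
--             return i
--     return 0
-- ===== Notes on version B (the rewrite author's own statement) =====
-- stated objective: simpler
-- what changed: Replaces the loop over the 8 breaking strings (each doing a full rfind over the string) with a single reverse scan of the string that returns the first index whose character is in the breaking set, defaulting to 0.
import Mathlib
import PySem

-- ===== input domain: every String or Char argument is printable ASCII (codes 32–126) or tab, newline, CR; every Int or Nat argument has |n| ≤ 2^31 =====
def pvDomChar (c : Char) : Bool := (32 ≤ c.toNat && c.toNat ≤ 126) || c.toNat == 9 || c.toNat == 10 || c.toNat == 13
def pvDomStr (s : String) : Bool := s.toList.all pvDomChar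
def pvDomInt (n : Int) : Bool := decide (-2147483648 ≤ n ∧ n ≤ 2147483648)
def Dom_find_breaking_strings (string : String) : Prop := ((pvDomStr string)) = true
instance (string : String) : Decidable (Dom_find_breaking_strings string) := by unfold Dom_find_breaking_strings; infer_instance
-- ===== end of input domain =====

-- B replaces A's loop over the 8 breaking strings (a full rfind each) with a single
-- reverse scan of the string using set membership; objective: simpler.


-- ===== PORT A =====
def fbsBreaks : List String := [" ", "@", "?", "#", "$", "%", "&", "*"]

-- the 'for breaking_string in breaking_strings' loop, state = result
def fbsLoop (string : String) : List String → Int → Int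
  | [], result => result
  | b :: bs, result =>
    let rf := PySem.Str.rfind string b
    fbsLoop string bs (if rf > result then rf else result)

def find_breaking_strings (string : String) : Int :=
  fbsLoop string fbsBreaks 0

-- ===== PORT B =====
def altBreaks : List Char := [' ', '@', '?', '#', '$', '%', '&', '*']

def altIsBreak (c : Char) : Bool := altBreaks.contains c

-- the 'for i in range(len(string)-1, -1, -1)' loop: scan the reversed characters,
-- i is the original index of the character at the head
def altScan : List Char → Int → Int
  | [], _ => 0
  | c :: rest, i => if altIsBreak c then i else altScan rest (i - 1)

def find_breaking_strings_alt (string : String) : Int :=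
  altScan string.toList.reverse ((string.toList.length : Int) - 1)

-- ===== PRECONDITION & SPEC =====
def Spec_find_breaking_strings (string : String) (out : Int) : Prop := out = find_breaking_strings_alt string
instance (string : String) (out : Int) : Decidable (Spec_find_breaking_strings string out) := by unfold Spec_find_breaking_strings; infer_instance

-- ===== CLAIM (what is proved, stated in full; the proofs are below) =====
def Claim_equal_find_breaking_strings : Prop := ∀ (string : String), Dom_find_breaking_strings string → Spec_find_breaking_strings string (find_breaking_strings string)

-- ===== LEMMAS AND PROOFS =====

-- A's loop at the level of character lists (fbsLoop bridges to this via Str.rfind_eq)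
def aGoL (s : List Char) : List Char → Int → Int
  | [], r => r
  | b :: bs, r =>
    let rf := PySem.Chars.rfind s [b]
    aGoL s bs (if rf > r then rf else r)

theorem prefix_singleton (b : Char) (l : List Char) :
    [b].isPrefixOf l = (l[0]? == some b) := by
  cases l with
  | nil => simp [List.isPrefixOf]
  | cons c t => simp [List.isPrefixOf, BEq.comm]

theorem go_zero (s : List Char) (b : Char) :
    PySem.Chars.rfind.go s [b] 0 = if s[0]? = some b then 0 else -1 := by
  simp [PySem.Chars.rfind.go, prefix_singleton]

theorem go_succ (s : List Char) (b : Char) (j : Nat) :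
    PySem.Chars.rfind.go s [b] (j + 1)
      = if s[j + 1]? = some b then ((j : Int) + 1) else PySem.Chars.rfind.go s [b] j := by
  have hd : (List.drop (j + 1) s)[0]? = s[j + 1]? := by
    rw [List.getElem?_drop]
  simp only [PySem.Chars.rfind.go, prefix_singleton, hd, beq_iff_eq]
  split_ifs with h
  · push_cast; ring
  · rfl

theorem go_cases (s : List Char) (b : Char) : ∀ n : Nat,
    PySem.Chars.rfind.go s [b] n = -1 ∨
      ∃ j : Nat, j ≤ n ∧ s[j]? = some b ∧ PySem.Chars.rfind.go s [b] n = j := by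
  intro n
  induction n with
  | zero =>
    rw [go_zero]; split_ifs with h
    · exact Or.inr ⟨0, le_refl _, h, rfl⟩
    · exact Or.inl rfl
  | succ m ih =>
    rw [go_succ]; split_ifs with h
    · exact Or.inr ⟨m + 1, le_refl _, h, by push_cast; ring⟩
    · rcases ih with h' | ⟨j, hj, hb, hv⟩
      · exact Or.inl h'
      · exact Or.inr ⟨j, by omega, hb, hv⟩

theorem rfind_lt (s : List Char) (b : Char) :
    PySem.Chars.rfind s [b] < (s.length : Int) := by
  unfold PySem.Chars.rfind
  rcases go_cases s b s.length with h | ⟨j, _, hb, hv⟩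
  · rw [h]; omega
  · rw [hv]
    have : j < s.length := by
      by_contra hc
      rw [List.getElem?_eq_none (by omega)] at hb
      simp at hb
    exact_mod_cast this

theorem go_append (s : List Char) (c b : Char) :
    ∀ m : Nat, m < s.length →
      PySem.Chars.rfind.go (s ++ [c]) [b] m = PySem.Chars.rfind.go s [b] m := by
  intro m
  induction m with
  | zero =>
    intro h
    rw [go_zero, go_zero, List.getElem?_append_left h]
  | succ k ih =>
    intro h
    rw [go_succ, go_succ, List.getElem?_append_left h, ih (by omega)]

theorem rfind_snoc (s : List Char) (c b : Char) :
    PySem.Chars.rfind (s ++ [c]) [b]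
      = if c = b then (s.length : Int) else PySem.Chars.rfind s [b] := by
  unfold PySem.Chars.rfind
  have hlen : (s ++ [c]).length = s.length + 1 := by simp
  rw [hlen, go_succ]
  have htop : (s ++ [c])[s.length + 1]? = none := by
    rw [List.getElem?_eq_none]; simp
  rw [htop]
  simp only [reduceCtorEq, if_false]
  cases s with
  | nil =>
    simp only [List.nil_append, List.length_nil]
    rw [go_zero, go_zero]
    simp
  | cons d t =>
    have h1 : (d :: t).length = t.length + 1 := by simp
    rw [h1, go_succ, go_succ]
    have h2 : ((d :: t) ++ [c])[t.length + 1]? = some c := by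
      rw [List.getElem?_append_right (by simp)]; simp
    have h3 : (d :: t)[t.length + 1]? = none := by
      rw [List.getElem?_eq_none]; simp
    rw [h2, h3]
    simp only [reduceCtorEq, if_false]
    rw [go_append (d :: t) c b t.length (by simp)]
    by_cases hc : c = b
    · simp [hc]
    · have : ¬ (some c = some b) := by simp [hc]
      simp only [this, if_false, hc, if_false]

theorem aGoL_congr (s s' : List Char) (bs : List Char) (r : Int)
    (h : ∀ b ∈ bs, PySem.Chars.rfind s [b] = PySem.Chars.rfind s' [b]) :
    aGoL s bs r = aGoL s' bs r := by
  induction bs generalizing r with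
  | nil => rfl
  | cons b bs ih =>
    simp only [aGoL]
    rw [h b (List.mem_cons_self ..)]
    exact ih _ (fun b' hb' => h b' (List.mem_cons_of_mem _ hb'))

theorem aGoL_le (s : List Char) (bs : List Char) (r m : Int)
    (h : ∀ b ∈ bs, PySem.Chars.rfind s [b] ≤ m) (hr : r ≤ m) :
    aGoL s bs r ≤ m := by
  induction bs generalizing r with
  | nil => exact hr
  | cons b bs ih =>
    simp only [aGoL]
    apply ih _ (fun b' hb' => h b' (List.mem_cons_of_mem _ hb'))
    have := h b (List.mem_cons_self ..)
    split_ifs <;> omega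

theorem aGoL_ge_init (s : List Char) (bs : List Char) (r : Int) :
    r ≤ aGoL s bs r := by
  induction bs generalizing r with
  | nil => simp [aGoL]
  | cons b bs ih =>
    simp only [aGoL]
    split_ifs with h
    · have := ih (r := PySem.Chars.rfind s [b]); omega
    · exact ih r

theorem aGoL_ge_rfind (s : List Char) (bs : List Char) (r : Int) (b : Char)
    (hb : b ∈ bs) : PySem.Chars.rfind s [b] ≤ aGoL s bs r := by
  induction bs generalizing r with
  | nil => simp at hb
  | cons b' bs ih =>
    simp only [aGoL]
    rcases List.mem_cons.mp hb with h | h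
    · subst h
      split_ifs with h'
      · exact aGoL_ge_init s bs _
      · have := aGoL_ge_init s bs r; omega
    · exact ih _ h

theorem key_list : ∀ cs : List Char,
    aGoL cs altBreaks 0 = altScan cs.reverse ((cs.length : Int) - 1) := by
  intro cs
  induction cs using List.reverseRecOn with
  | nil => decide
  | append_singleton cs c ih =>
    have hrev : (cs ++ [c]).reverse = c :: cs.reverse := by simp
    have hlen : ((cs ++ [c]).length : Int) - 1 = (cs.length : Int) := by simp
    rw [hrev, hlen]
    simp only [altScan]
    by_cases hc : altIsBreak c = true
    · rw [if_pos hc]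
      have hmem : c ∈ altBreaks := by
        simpa [altIsBreak] using hc
      apply le_antisymm
      · apply aGoL_le
        · intro b hb
          rw [rfind_snoc]
          split_ifs with h
          · exact le_refl _
          · exact le_of_lt (rfind_lt cs b)
        · omega
      · have h1 := aGoL_ge_rfind (cs ++ [c]) altBreaks 0 c hmem
        rw [rfind_snoc, if_pos rfl] at h1
        exact h1
    · rw [if_neg hc]
      rw [← ih]
      apply aGoL_congr
      intro b hb
      rw [rfind_snoc]
      have : c ≠ b := by
        intro h; subst h
        exact hc (by simpa [altIsBreak] using hb)
      rw [if_neg this]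

theorem A_eq_chars (s : String) : find_breaking_strings s = aGoL s.toList altBreaks 0 := by
  have h1 : (" " : String).toList = [' '] := rfl
  have h2 : ("@" : String).toList = ['@'] := rfl
  have h3 : ("?" : String).toList = ['?'] := rfl
  have h4 : ("#" : String).toList = ['#'] := rfl
  have h5 : ("$" : String).toList = ['$'] := rfl
  have h6 : ("%" : String).toList = ['%'] := rfl
  have h7 : ("&" : String).toList = ['&'] := rfl
  have h8 : ("*" : String).toList = ['*'] := rfl
  simp only [find_breaking_strings, fbsBreaks, fbsLoop, aGoL, altBreaks,
    PySem.Str.rfind_eq, h1, h2, h3, h4, h5, h6, h7, h8]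

-- ===== VERDICT (by name: the statement is the Claim_ definition above) =====
theorem find_breaking_strings_spec : Claim_equal_find_breaking_strings := by
  intro s _
  unfold Spec_find_breaking_strings find_breaking_strings_alt
  rw [A_eq_chars, key_list]
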